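-- pv_equiv track=rewrite | github.com/DaviPrograme/asteroids | backend/db/query.py | score_achievement
-- ===== SOURCE A (Python) =====
-- def score_achievement(score):
--     """score_achievement
--         Método que verifica a conquista de pontuação
--         :param score: Pontuação
--     """
--     score_achieved = {
--         1: "First Score",
--         100: "100 Points",
--         500: "500 Points",
--         1000: "1000 Points",
--         5000: "5000 Points",
--         10000: "10000 Points",
--     }
--     result = [key for key in score_achieved.keys() if key <= score]
--     if result:
--         return [score_achieved[key] for key in result]
--     return []
-- ===== SOURCE B (Python) =====
-- def score_achievement(score):
--     """Binary search over a sorted threshold table, then slice the aligned names."""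
--     thresholds = [1, 100, 500, 1000, 5000, 10000]
--     names = ["First Score", "100 Points", "500 Points",
--              "1000 Points", "5000 Points", "10000 Points"]
--     lo, hi = 0, len(thresholds)
--     while lo < hi:
--         mid = (lo + hi) // 2
--         if thresholds[mid] <= score:
--             lo = mid + 1
--         else:
--             hi = mid
--     return names[:lo]
-- ===== Notes on version B (the rewrite author's own statement) =====
-- stated objective: alternative
-- what changed: Replaced the dict build + linear filter/lookup passes with a sorted threshold table searched by hand-rolled binary search (bisect_right) and a slice of the aligned names list.
import Mathlib
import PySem

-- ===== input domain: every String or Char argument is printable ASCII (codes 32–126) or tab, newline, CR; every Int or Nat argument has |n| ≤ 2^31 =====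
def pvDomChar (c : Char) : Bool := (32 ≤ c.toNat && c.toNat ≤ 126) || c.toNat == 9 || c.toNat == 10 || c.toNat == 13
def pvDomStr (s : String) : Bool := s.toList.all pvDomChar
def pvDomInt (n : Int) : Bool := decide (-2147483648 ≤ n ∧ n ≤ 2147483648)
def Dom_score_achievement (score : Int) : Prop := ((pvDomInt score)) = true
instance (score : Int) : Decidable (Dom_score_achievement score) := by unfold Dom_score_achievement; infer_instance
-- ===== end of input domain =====

-- B replaces the dict scan with binary search over a sorted threshold table + a slice (alternative decomposition, same values).

-- ===== PORT A =====
def score_achievement (score : Int) : List String :=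
  let score_achieved : PySem.Dict Int String :=
    ((((((PySem.Dict.empty).insert 1 "First Score").insert 100 "100 Points").insert 500 "500 Points").insert 1000 "1000 Points").insert 5000 "5000 Points").insert 10000 "10000 Points"
  let result : List Int := (PySem.Dict.keys score_achieved).filter (fun key => key ≤ score)
  if result ≠ [] then
    -- score_achieved[key]: key always comes from the dict's own keys, so the lookup succeeds; getD "" is unreachable
    result.map (fun key => (PySem.Dict.get? score_achieved key).getD "")
  else []

-- ===== PORT B =====
def pvBisect (thresholds : List Int) (score : Int) (lo hi : Nat) : Nat :=
  if _h : lo < hi then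
    let mid := (lo + hi) / 2
    if ((PySem.List.pyGet? thresholds (Int.ofNat mid)).getD 0) ≤ score then
      pvBisect thresholds score (mid + 1) hi
    else
      pvBisect thresholds score lo mid
  else lo
termination_by hi - lo
decreasing_by all_goals omega

def score_achievement_alt (score : Int) : List String :=
  let thresholds : List Int := [1, 100, 500, 1000, 5000, 10000]
  let names : List String := ["First Score", "100 Points", "500 Points", "1000 Points", "5000 Points", "10000 Points"]
  let lo := pvBisect thresholds score 0 thresholds.length
  PySem.List.slice names none (some (Int.ofNat lo))

-- ===== PRECONDITION & SPEC =====
def Spec_score_achievement (score : Int) (out : List String) : Prop := out = score_achievement_alt score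
instance (score : Int) (out : List String) : Decidable (Spec_score_achievement score out) := by unfold Spec_score_achievement; infer_instance

-- ===== CLAIM (what is proved, stated in full; the proofs are below) =====
def Claim_equal_score_achievement : Prop := ∀ (score : Int), Dom_score_achievement score → Spec_score_achievement score (score_achievement score)

-- ===== LEMMAS AND PROOFS =====
set_option maxHeartbeats 1600000 in
theorem score_achievement_cases (score : Int) :
    score_achievement score = score_achievement_alt score := by
  by_cases h1 : (1 : Int) ≤ score <;>
  by_cases h2 : (100 : Int) ≤ score <;>
  by_cases h3 : (500 : Int) ≤ score <;>
  by_cases h4 : (1000 : Int) ≤ score <;>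
  by_cases h5 : (5000 : Int) ≤ score <;>
  by_cases h6 : (10000 : Int) ≤ score <;>
  first
    | omega
    | (simp_all [score_achievement, score_achievement_alt, pvBisect,
        PySem.Dict.empty, PySem.Dict.insert, PySem.Dict.keys, PySem.Dict.get?,
        PySem.List.pyGet?, PySem.List.pyIdx?, PySem.List.slice, PySem.List.clampIdx] <;>
       split_ifs <;> first | rfl | omega)

-- ===== VERDICT (by name: the statement is the Claim_ definition above) =====
theorem score_achievement_spec : Claim_equal_score_achievement := by
  intro score _
  exact score_achievement_cases score
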